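-- pv_equiv track=rewrite | github.com/cakelake1/Python-study | 1.3/1.3.1/5_task.py | massdriver
-- ===== SOURCE A (Python) =====
-- def massdriver(activate):
--     if len(activate) < 2 :
--         return -1
--     dict_activate = {}
--     result = -1
--     for i, j in enumerate(activate):
--         if j in dict_activate:
--             if result == -1 or dict_activate[j] < result:
--                 result = dict_activate[j]
--         else:
--             dict_activate[j] = i
--     return result
-- ===== SOURCE B (Python) =====
-- def massdriver(activate):
--     counts = {}
--     for x in activate:
--         counts[x] = counts.get(x, 0) + 1
--     for i, x in enumerate(activate):
--         if counts[x] > 1: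
--             return i
--     return -1
-- ===== Notes on version B (the rewrite author's own statement) =====
-- stated objective: simpler
-- what changed: Replaces A's single-pass running-minimum over a value->first-index dict by a two-pass count-then-find-first: build a frequency map, then return the index of the first element whose count exceeds 1 (no minimum is ever maintained).
import Mathlib
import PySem

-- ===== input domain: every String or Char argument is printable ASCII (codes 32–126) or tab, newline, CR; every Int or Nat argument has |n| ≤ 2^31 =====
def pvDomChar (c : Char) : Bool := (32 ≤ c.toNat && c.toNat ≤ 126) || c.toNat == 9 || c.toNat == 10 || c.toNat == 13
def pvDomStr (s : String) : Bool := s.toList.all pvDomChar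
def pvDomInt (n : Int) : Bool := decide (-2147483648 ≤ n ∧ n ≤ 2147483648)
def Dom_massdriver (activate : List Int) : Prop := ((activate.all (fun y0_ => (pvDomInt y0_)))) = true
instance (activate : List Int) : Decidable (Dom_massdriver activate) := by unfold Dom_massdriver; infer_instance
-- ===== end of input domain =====

-- B replaces A's single-pass running-minimum over a value→first-index dict by a
-- two-pass count-then-find-first (build a frequency map, return the first index whose
-- value has count > 1); objective: simpler.

-- ===== PORT A =====
-- one loop step: 'if j in dict_activate: …update result… else: dict_activate[j] = i'
-- ('j in dict_activate' then 'dict_activate[j]' ported as a single get? match)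
def aStep (st : PySem.Dict Int Int × Int) (p : Int × Int) : PySem.Dict Int Int × Int :=
  match st.1.get? p.2 with
  | some fi => if st.2 = -1 ∨ fi < st.2 then (st.1, fi) else st
  | none => (st.1.insert p.2 p.1, st.2)

def massdriver (activate : List Int) : Int :=
  if (activate.length : Int) < 2 then -1
  else ((PySem.List.enumerate activate 0).foldl aStep (PySem.Dict.empty, -1)).2

-- ===== PORT B =====
-- first pass: 'counts[x] = counts.get(x, 0) + 1'
def altCounts (a : List Int) : PySem.Dict Int Int :=
  a.foldl (fun d x => d.modify x 0 (· + 1)) PySem.Dict.empty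

-- second pass: 'for i, x in enumerate(activate): if counts[x] > 1: return i'
-- (counts[x] read as getD; the key is always present after the first pass)
def altFind (c : PySem.Dict Int Int) : List (Int × Int) → Int
  | [] => -1
  | (i, x) :: t => if 1 < c.getD x 0 then i else altFind c t

def massdriver_alt (activate : List Int) : Int :=
  altFind (altCounts activate) (PySem.List.enumerate activate 0)

-- ===== PRECONDITION & SPEC =====
def Spec_massdriver (activate : List Int) (out : Int) : Prop := out = massdriver_alt activate
instance (activate : List Int) (out : Int) : Decidable (Spec_massdriver activate out) := by unfold Spec_massdriver; infer_instance

-- ===== CLAIM (what is proved, stated in full; the proofs are below) =====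
def Claim_equal_massdriver : Prop := ∀ (activate : List Int), Dom_massdriver activate → Spec_massdriver activate (massdriver activate)

-- ===== LEMMAS AND PROOFS =====

-- reference value: index of the first element that occurs again in its own tail (-1 if none);
-- this is the minimal first-occurrence index among duplicated values.
def g : List Int → Int
  | [] => -1
  | x :: t => if x ∈ t then 0 else (if g t = -1 then -1 else g t + 1)

lemma g_cases (l : List Int) : g l = -1 ∨ 0 ≤ g l := by
  induction l with
  | nil => left; rfl
  | cons x t ih =>
    simp only [g]
    split_ifs <;> omega

-- first index of v in l (what A's dict stores), as an Int
def fio (v : Int) : List Int → Option Int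
  | [] => none
  | y :: t => if y = v then some 0 else (fio v t).map (· + 1)

lemma fio_nonneg (v : Int) (l : List Int) : ∀ i, fio v l = some i → 0 ≤ i := by
  induction l with
  | nil => intro i h; simp [fio] at h
  | cons y t ih =>
    intro i h
    simp only [fio] at h
    split_ifs at h with hy
    · simp at h; omega
    · obtain ⟨j, hj, hji⟩ := Option.map_eq_some_iff.mp h
      have := ih j hj; omega

lemma fio_none_iff (v : Int) (l : List Int) : fio v l = none ↔ v ∉ l := by
  induction l with
  | nil => simp [fio]
  | cons y t ih =>
    simp only [fio, List.mem_cons]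
    split_ifs with hy
    · simp [hy]
    · rw [Option.map_eq_none_iff, ih]
      have hvy : ¬ v = y := fun e => hy e.symm
      tauto

lemma fio_append (v x : Int) (pre : List Int) :
    fio v (pre ++ [x]) =
      match fio v pre with
      | some i => some i
      | none => if x = v then some (pre.length : Int) else none := by
  induction pre with
  | nil => simp [fio]
  | cons y t ih =>
    by_cases hy : y = v
    · simp only [List.cons_append, fio, if_pos hy]
    · simp only [List.cons_append, fio, if_neg hy, ih]
      cases h : fio v t with
      | some i => simp
      | none =>
        by_cases hx : x = v
        · simp [hx]
        · simp [hx]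

-- g over a snoc: appending x leaves g unchanged when x is new …
lemma g_append_none (pre : List Int) (x : Int) (h : fio x pre = none) :
    g (pre ++ [x]) = g pre := by
  induction pre with
  | nil => simp [g]
  | cons y t ih =>
    simp only [fio] at h
    split_ifs at h with hy
    · have h' : fio x t = none := Option.map_eq_none_iff.mp h
      have hyx : y ≠ x := hy
      by_cases hyt : y ∈ t
      · have h1 : y ∈ t ++ [x] := by simp [hyt]
        simp only [List.cons_append, g]
        rw [if_pos h1, if_pos hyt]
      · have h1 : y ∉ t ++ [x] := by simp [hyt, hyx]
        simp only [List.cons_append, g]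
        rw [if_neg h1, if_neg hyt, ih h']

-- … and otherwise turns the first occurrence of x into the new candidate minimum
lemma g_append_some (pre : List Int) (x : Int) :
    ∀ i, fio x pre = some i →
    g (pre ++ [x]) = if g pre = -1 ∨ i < g pre then i else g pre := by
  induction pre with
  | nil => intro i h; simp [fio] at h
  | cons y t ih =>
    intro i h
    simp only [fio] at h
    split_ifs at h with hy
    · -- y = x, i = 0
      have hi : i = 0 := by simp at h; omega
      subst hi; subst hy
      have hL : g ((y :: t) ++ [y]) = 0 := by
        have h1 : y ∈ t ++ [y] := by simp
        simp only [List.cons_append, g]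
        rw [if_pos h1]
      rw [hL]
      rcases g_cases (y :: t) with hg | hg
      · rw [if_pos (Or.inl hg)]
      · by_cases h0 : g (y :: t) = 0
        · rw [h0]; simp
        · rw [if_pos (Or.inr (by omega))]
    · -- y ≠ x
      obtain ⟨j, hj, hji⟩ := Option.map_eq_some_iff.mp h
      have hjn : 0 ≤ j := fio_nonneg x t j hj
      have hxt : x ∈ t := by
        by_contra hm
        have h0 := (fio_none_iff x t).mpr hm
        rw [h0] at hj; simp at hj
      have hyx : y ≠ x := hy
      by_cases hyt : y ∈ t
      · have hL : g ((y :: t) ++ [x]) = 0 := by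
          have h1 : y ∈ t ++ [x] := by simp [hyt]
          simp only [List.cons_append, g]
          rw [if_pos h1]
        have hR : g (y :: t) = 0 := by
          simp only [g]; rw [if_pos hyt]
        rw [hL, hR, if_neg (by omega : ¬ ((0:Int) = -1 ∨ i < 0))]
      · have h1 : y ∉ t ++ [x] := by simp [hyt, hyx]
        have hL : g ((y :: t) ++ [x]) =
            if g (t ++ [x]) = -1 then -1 else g (t ++ [x]) + 1 := by
          simp only [List.cons_append, g]
          rw [if_neg h1]
        have hR : g (y :: t) = if g t = -1 then -1 else g t + 1 := by
          simp only [g]; rw [if_neg hyt]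
        rw [hL, hR, ih j hj]
        rcases g_cases t with hg | hg <;> · split_ifs <;> omega

-- A's loop with its invariant: the dict maps each seen value to its first index,
-- and the accumulator equals g of the processed prefix.
lemma A_loop (s : List Int) : ∀ (pre : List Int) (d : PySem.Dict Int Int) (r : Int),
    (∀ w, d.get? w = fio w pre) → r = g pre →
    ((PySem.List.enumerate s (pre.length : Int)).foldl aStep (d, r)).2 = g (pre ++ s) := by
  induction s with
  | nil => intro pre d r _ hr; simpa using hr
  | cons x t ih =>
    intro pre d r hd hr
    rw [PySem.List.enumerate_cons, List.foldl_cons]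
    have hlen : ((pre.length : Int) + 1) = (((pre ++ [x]).length : Nat) : Int) := by
      simp
    cases hfx : fio x pre with
    | some i =>
      have hget : d.get? x = some i := by rw [hd x, hfx]
      have hA : aStep (d, r) ((pre.length : Int), x) =
          (d, if r = -1 ∨ i < r then i else r) := by
        simp only [aStep, hget]
        split_ifs <;> rfl
      rw [hA, hlen]
      have hrec := ih (pre ++ [x]) d (if r = -1 ∨ i < r then i else r)
        (by intro w
            rw [hd w, fio_append w x pre]
            cases hw : fio w pre with
            | some j => rfl
            | none =>
              split_ifs with hxw
              · subst hxw; rw [hw] at hfx; simp at hfx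
              · rfl)
        (by rw [g_append_some pre x i hfx, hr])
      rw [hrec, List.append_assoc]
      rfl
    | none =>
      have hget : d.get? x = none := by rw [hd x, hfx]
      have hA : aStep (d, r) ((pre.length : Int), x) =
          (d.insert x (pre.length : Int), r) := by
        simp only [aStep, hget]
      rw [hA, hlen]
      have hrec := ih (pre ++ [x]) (d.insert x (pre.length : Int)) r
        (by intro w
            rw [PySem.Dict.get?_insert, hd w, fio_append w x pre]
            cases hw : fio w pre with
            | some j =>
              split_ifs with h1 h2 h2 <;>
                first
                  | rfl
                  | (rw [h1] at hw; rw [hw] at hfx; simp at hfx)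
            | none =>
              split_ifs with h1 h2 h2
              · rfl
              · exact absurd h1.symm h2
              · exact absurd h2.symm h1
              · rfl)
        (by rw [g_append_none pre x hfx, hr])
      rw [hrec, List.append_assoc]
      rfl


lemma massdriver_eq_g (a : List Int) : massdriver a = g a := by
  unfold massdriver
  split_ifs with h
  · cases a with
    | nil => rfl
    | cons x t =>
      cases t with
      | nil => simp [g]
      | cons y u => exfalso; simp at h; omega
  · have h1 : ∀ w, (PySem.Dict.empty : PySem.Dict Int Int).get? w = fio w [] := by
      intro w; rw [PySem.Dict.get?_empty]; rfl
    have := A_loop a [] PySem.Dict.empty (-1) h1 rfl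
    simpa using this

-- B's second loop on enumerate with a shifted start index
lemma altFind_shift (l : List Int) : ∀ (c : PySem.Dict Int Int) (s : Int), 0 ≤ s →
    altFind c (PySem.List.enumerate l (s + 1)) =
      (if altFind c (PySem.List.enumerate l s) = -1 then -1
       else altFind c (PySem.List.enumerate l s) + 1) := by
  induction l with
  | nil => intro c s hs; simp [PySem.List.enumerate_nil, altFind]
  | cons x t ih =>
    intro c s hs
    rw [PySem.List.enumerate_cons, PySem.List.enumerate_cons]
    simp only [altFind]
    by_cases hp : 1 < c.getD x 0
    · simp only [if_pos hp]
      rw [if_neg (show ¬ s = -1 by omega)]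
    · simp only [if_neg hp]
      exact ih c (s + 1) (by omega)

lemma altFind_eq_g (a : List Int) : ∀ (c : PySem.Dict Int Int),
    (∀ x ∈ a, c.getD x 0 = (a.count x : Int)) →
    altFind c (PySem.List.enumerate a 0) = g a := by
  induction a with
  | nil => intro c _; simp [PySem.List.enumerate_nil, altFind, g]
  | cons x t ih =>
    intro c hc
    rw [PySem.List.enumerate_cons]
    simp only [altFind]
    have hcx := hc x (by simp)
    have hcount : ((x :: t).count x : Int) = (t.count x : Int) + 1 := by
      simp
    by_cases hxt : x ∈ t
    · have hgt : 1 < c.getD x 0 := by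
        have : 0 < t.count x := List.count_pos_iff.mpr hxt
        omega
      rw [if_pos hgt]
      simp only [g]
      rw [if_pos hxt]
    · have hc1 : ¬ 1 < c.getD x 0 := by
        have : t.count x = 0 := List.count_eq_zero.mpr hxt
        omega
      rw [if_neg hc1, altFind_shift t c 0 le_rfl]
      have ht : altFind c (PySem.List.enumerate t 0) = g t := by
        apply ih
        intro y hy
        have hxy : ¬ x = y := fun e => hxt (e ▸ hy)
        rw [hc y (by simp [hy])]
        simp [hxy]
      rw [ht]
      simp only [g]
      rw [if_neg hxt]

lemma massdriver_alt_eq_g (a : List Int) : massdriver_alt a = g a := by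
  unfold massdriver_alt
  apply altFind_eq_g
  intro x _
  show (altCounts a).getD x 0 = (a.count x : Int)
  unfold altCounts
  rw [PySem.Dict.getD_foldl_modify_add_one]
  rw [PySem.Dict.getD_empty]
  ring

-- ===== VERDICT (by name: the statement is the Claim_ definition above) =====
theorem massdriver_spec : Claim_equal_massdriver := by
  intro activate _
  show massdriver activate = massdriver_alt activate
  rw [massdriver_eq_g, massdriver_alt_eq_g]
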